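-- pv_equiv track=rewrite | github.com/juaiglesias/pos-tagger | statistics.py | countSet
-- ===== SOURCE A (Python) =====
-- def countSet (dataset):
--     sentencesCount = len(dataset)
--     wordsCount = 0
--     differentwords = len(getWords(dataset))
--     for words, _ in dataset:
--         for _ in words:
--             wordsCount+=1
--     return (sentencesCount, wordsCount, differentwords)
--
-- def getWords (dataset):
--     return set(word for words, labels in dataset for word in words)
-- ===== SOURCE B (Python) =====
-- def countSet(dataset):
--     flat = sorted(w for words, _ in dataset for w in words)
--     total = 0
--     distinct = 0
--     prev = None
--     for w in flat:
--         total += 1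
--         if w != prev:
--             distinct += 1
--             prev = w
--     return (len(dataset), total, distinct)
-- ===== Notes on version B (the rewrite author's own statement) =====
-- stated objective: alternative
-- what changed: Replaces A's hash-set distinct count (getWords building a set) and nested counting loop with a sort-then-scan: flatten all words, sort them, and count distinct words by a single scan over adjacent unequal neighbours (trading O(n) hashing for O(n log n) sorting).
import Mathlib
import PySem

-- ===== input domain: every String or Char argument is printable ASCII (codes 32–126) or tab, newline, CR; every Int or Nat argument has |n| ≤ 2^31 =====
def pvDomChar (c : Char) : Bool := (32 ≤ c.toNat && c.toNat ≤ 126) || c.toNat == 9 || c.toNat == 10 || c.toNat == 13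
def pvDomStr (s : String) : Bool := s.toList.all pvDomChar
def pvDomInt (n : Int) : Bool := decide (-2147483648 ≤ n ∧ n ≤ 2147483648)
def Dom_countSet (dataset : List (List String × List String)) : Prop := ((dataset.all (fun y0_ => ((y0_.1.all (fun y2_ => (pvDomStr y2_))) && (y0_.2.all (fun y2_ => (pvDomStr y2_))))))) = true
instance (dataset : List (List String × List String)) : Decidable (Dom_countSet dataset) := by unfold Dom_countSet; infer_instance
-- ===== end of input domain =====

-- B replaces A's hash-set distinct count with a sort-then-scan over adjacent unequal words (objective: alternative).
-- ===== PORT A =====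
def getWords (dataset : List (List String × List String)) : PySem.Set String :=
  PySem.Set.ofList (dataset.flatMap (fun p => p.1))

def countSet (dataset : List (List String × List String)) : Int × Int × Int :=
  let sentencesCount : Int := dataset.length
  let wordsCount : Int := 0
  let differentwords : Int := PySem.Set.len (getWords dataset)
  let wordsCount : Int :=
    dataset.foldl (fun acc p => p.1.foldl (fun a _ => a + 1) acc) wordsCount
  (sentencesCount, wordsCount, differentwords)

-- ===== PORT B =====
def countSet_alt (dataset : List (List String × List String)) : Int × Int × Int :=
  let flat : List String :=
    PySem.List.sorted (dataset.flatMap (fun p => p.1)) (fun w => w) false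
  let st : Int × Int × Option String :=
    flat.foldl
      (fun st w =>
        let total := st.1 + 1
        let distinct := if some w ≠ st.2.2 then st.2.1 + 1 else st.2.1
        let prev := if some w ≠ st.2.2 then some w else st.2.2
        (total, distinct, prev))
      (0, 0, none)
  ((dataset.length : Int), st.1, st.2.1)

-- ===== PRECONDITION & SPEC =====
def Spec_countSet (dataset : List (List String × List String)) (out : Int × Int × Int) : Prop := out = countSet_alt dataset
instance (dataset : List (List String × List String)) (out : Int × Int × Int) : Decidable (Spec_countSet dataset out) := by unfold Spec_countSet; infer_instance

-- ===== CLAIM (what is proved, stated in full; the proofs are below) =====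
def Claim_equal_countSet : Prop := ∀ (dataset : List (List String × List String)), Dom_countSet dataset → Spec_countSet dataset (countSet dataset)

-- ===== LEMMAS AND PROOFS =====

-- A's nested counting loop sums the lengths.
lemma foldl_count_eq (xs : List String) (a : Int) :
    xs.foldl (fun a _ => a + 1) a = a + xs.length := by
  induction xs generalizing a with
  | nil => simp
  | cons x t ih => simp [List.foldl, ih]; omega

lemma nested_count (dataset : List (List String × List String)) (a : Int) :
    dataset.foldl (fun acc p => p.1.foldl (fun a _ => a + 1) acc) a
      = a + ((dataset.flatMap (fun p => p.1)).length : Int) := by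
  induction dataset generalizing a with
  | nil => simp
  | cons h t ih =>
      rw [List.foldl_cons, foldl_count_eq, ih]
      simp only [List.flatMap_cons, List.length_append]
      push_cast; omega

-- spec of B's scan: number of boundaries (w ≠ previous element)
def dcount (p : Option String) : List String → Int
  | [] => 0
  | w :: t => (if some w ≠ p then 1 else 0) + dcount (some w) t

def lastP (p : Option String) (ys : List String) : Option String :=
  match ys.getLast? with
  | some w => some w
  | none => p

lemma lastP_cons (p : Option String) (w : String) (t : List String) :
    lastP p (w :: t) = lastP (some w) t := by
  cases t with
  | nil => simp [lastP]
  | cons a b =>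
      unfold lastP
      cases hl : (a :: b).getLast? with
      | none => simp [List.getLast?_eq_none_iff] at hl
      | some x => simp [List.getLast?_cons_cons, hl]

-- B's foldl in closed form
lemma scan_eq (ys : List String) (t0 d0 : Int) (p : Option String) :
    ys.foldl
      (fun st w =>
        let total := st.1 + 1
        let distinct := if some w ≠ st.2.2 then st.2.1 + 1 else st.2.1
        let prev := if some w ≠ st.2.2 then some w else st.2.2
        (total, distinct, prev))
      (t0, d0, p)
      = (t0 + ys.length, d0 + dcount p ys, lastP p ys) := by
  induction ys generalizing t0 d0 p with
  | nil => simp [dcount, lastP]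
  | cons w t ih =>
      rw [List.foldl_cons, lastP_cons]
      by_cases h : some w = p
      · simp only [h, ne_eq, not_true_eq_false, ite_false]
        rw [ih]
        refine Prod.ext (by simp only [List.length_cons]; push_cast; omega) (Prod.ext ?_ ?_)
        · simp [dcount, ← h]
        · simp [← h]
      · simp only [ne_eq, h, not_false_iff, ite_true]
        rw [ih]
        refine Prod.ext (by simp only [List.length_cons]; push_cast; omega) (Prod.ext ?_ ?_)
        · simp [dcount, h]; omega
        · rfl

-- For a sorted list, the scan with prev = q (q ≤ every element) counts the distinct elements other than q.
lemma dcount_sorted_some (ys : List String) (hp : ys.Pairwise (· ≤ ·)) (q : String)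
    (hle : ∀ x ∈ ys, q ≤ x) :
    dcount (some q) ys = ((ys.toFinset.erase q).card : Int) := by
  induction ys generalizing q with
  | nil => simp [dcount]
  | cons w t ih =>
      have hpt : t.Pairwise (· ≤ ·) := hp.tail
      have hwt : ∀ x ∈ t, w ≤ x := fun x hx => (List.pairwise_cons.mp hp).1 x hx
      by_cases h : w = q
      · subst h
        simp only [dcount, ne_eq, not_true_eq_false, ite_false]
        rw [ih hpt w hwt]
        simp [List.toFinset_cons, Finset.erase_insert_eq_erase]
      · have hqw : q < w := lt_of_le_of_ne (hle w (List.mem_cons_self)) (Ne.symm h)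
        have hqnt : q ∉ t.toFinset := by
          intro hq
          exact absurd (hwt q (List.mem_toFinset.mp hq)) (not_le.mpr hqw)
        simp only [dcount, ne_eq, Option.some.injEq, h, not_false_iff, if_pos]
        rw [ih hpt w hwt]
        have : (w :: t).toFinset.erase q = insert w (t.toFinset.erase q) := by
          rw [List.toFinset_cons, Finset.erase_insert_of_ne (Ne.symm (ne_of_lt hqw))]
        rw [this, Finset.erase_eq_self.mpr hqnt]
        rw [Finset.card_insert_eq_ite]
        split
        · rename_i hmem
          rw [Finset.card_erase_of_mem hmem]
          have hpos : 0 < t.toFinset.card := Finset.card_pos.mpr ⟨w, hmem⟩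
          omega
        · rename_i hmem
          rw [Finset.erase_eq_self.mpr hmem]
          push_cast; omega

lemma dcount_sorted_none (ys : List String) (hp : ys.Pairwise (· ≤ ·)) :
    dcount none ys = (ys.toFinset.card : Int) := by
  cases ys with
  | nil => simp [dcount]
  | cons w t =>
      have hwt : ∀ x ∈ t, w ≤ x := fun x hx => (List.pairwise_cons.mp hp).1 x hx
      simp only [dcount, ne_eq, reduceCtorEq, not_false_iff, if_pos]
      rw [dcount_sorted_some t hp.tail w hwt]
      rw [List.toFinset_cons, Finset.card_insert_eq_ite]
      split
      · rename_i hmem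
        rw [Finset.card_erase_of_mem hmem]
        have hpos : 0 < t.toFinset.card := Finset.card_pos.mpr ⟨w, hmem⟩
        omega
      · rename_i hmem
        rw [Finset.erase_eq_self.mpr hmem]
        push_cast; omega

-- A's set size is the number of distinct elements
lemma setLen_eq_card (xs : List String) :
    PySem.Set.len (PySem.Set.ofList xs) = (xs.toFinset.card : Int) := by
  have hnd : (PySem.Set.ofList xs).Nodup := PySem.Set.nodup_ofList xs
  have hfs : (PySem.Set.ofList xs).toFinset = xs.toFinset := by
    apply Finset.ext
    intro a
    simp [List.mem_toFinset, PySem.Set.mem_ofList]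
  have := List.toFinset_card_of_nodup hnd
  simp only [PySem.Set.len]
  rw [← hfs, this]

-- ===== VERDICT (by name: the statement is the Claim_ definition above) =====
theorem countSet_spec : Claim_equal_countSet := by
  intro dataset _
  unfold Spec_countSet countSet countSet_alt getWords
  set flat0 := dataset.flatMap (fun p => p.1) with hflat0
  set srt := PySem.List.sorted flat0 (fun w => w) false with hsrt
  have hperm : srt.Perm flat0 := PySem.List.sorted_perm flat0 (fun w => w) false
  have hpw : srt.Pairwise (· ≤ ·) := by
    have := PySem.List.sorted_pairwise flat0 (fun w => w)
    simpa using this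
  simp only [scan_eq, nested_count]
  refine Prod.ext (by simp) (Prod.ext ?_ ?_)
  · rw [hperm.length_eq, hflat0, List.length_flatMap, Nat.cast_list_sum, List.map_map]
  · simp only [dcount_sorted_none srt hpw, setLen_eq_card,
      List.toFinset_eq_of_perm _ _ hperm, zero_add]
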